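-- pv_equiv track=rewrite | github.com/GhaliOud/Text-prrocessing_indexing_retrieval | NEARoperator.py | near_query
-- ===== SOURCE A (Python) =====
-- def near_query(positional_index, token1, token2, k):
--     result_docs = set()
--
--     # Convert terms to lowercase
--     token1 = token1.lower()
--     token2 = token2.lower()
--
--     if token1 in positional_index and token2 in positional_index:
--         for doc_id in positional_index[token1]:
--             if doc_id in positional_index[token2]:
--                 positions1 = positional_index[token1][doc_id]
--                 positions2 = positional_index[token2][doc_id]
--
--                 # Check if any positions are within k tokens
--                 for pos1 in positions1:
--                     for pos2 in positions2:
--                         if abs(pos1 - pos2) <= k: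
--                             result_docs.add(doc_id)
--                             break
--
--     return result_docs
-- ===== SOURCE B (Python) =====
-- def near_query(positional_index, token1, token2, k):
--     result = set()
--     postings1 = positional_index.get(token1.lower())
--     postings2 = positional_index.get(token2.lower())
--     if postings1 is None or postings2 is None:
--         return result
--     for doc_id, positions1 in postings1.items():
--         positions2 = postings2.get(doc_id)
--         if positions2 is None:
--             continue
--         xs = sorted(positions1)
--         ys = sorted(positions2)
--         i = j = 0
--         while i < len(xs) and j < len(ys):
--             if abs(xs[i] - ys[j]) <= k:
--                 result.add(doc_id)
--                 break
--             if xs[i] < ys[j]: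
--                 i += 1
--             else:
--                 j += 1
--     return result
-- ===== Notes on version B (the rewrite author's own statement) =====
-- stated objective: alternative
-- what changed: Replaces the nested all-pairs position scan per shared document with a sort plus two-pointer sweep that advances the pointer behind the smaller position.
import Mathlib
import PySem

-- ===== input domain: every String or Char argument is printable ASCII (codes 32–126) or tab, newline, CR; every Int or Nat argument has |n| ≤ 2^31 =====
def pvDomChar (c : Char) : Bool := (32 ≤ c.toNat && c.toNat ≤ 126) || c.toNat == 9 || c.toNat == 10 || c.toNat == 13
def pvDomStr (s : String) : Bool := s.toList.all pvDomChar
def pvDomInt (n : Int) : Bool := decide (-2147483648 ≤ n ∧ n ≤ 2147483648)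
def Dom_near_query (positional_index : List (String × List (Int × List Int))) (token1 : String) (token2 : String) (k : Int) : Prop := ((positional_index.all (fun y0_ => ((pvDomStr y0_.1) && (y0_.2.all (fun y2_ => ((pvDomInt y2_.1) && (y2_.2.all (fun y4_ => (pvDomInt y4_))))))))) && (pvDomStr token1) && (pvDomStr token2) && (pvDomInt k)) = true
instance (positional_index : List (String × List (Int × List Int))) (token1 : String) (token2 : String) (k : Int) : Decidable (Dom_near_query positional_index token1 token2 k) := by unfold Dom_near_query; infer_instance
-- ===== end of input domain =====

-- B replaces A's all-pairs position scan per shared document by a sort + two-pointer sweep (objective: alternative).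
-- Both versions treat the association lists as the Python dicts they encode (PySem.Dict.ofList).

-- ===== PORT A =====
def near_query (positional_index : List (String × List (Int × List Int))) (token1 : String) (token2 : String) (k : Int) : List Int :=
  let result : PySem.Set Int := PySem.Set.empty
  let t1 := PySem.Str.lower token1
  let t2 := PySem.Str.lower token2
  let d := PySem.Dict.ofList positional_index
  if d.contains t1 && d.contains t2 then
    let d1 := PySem.Dict.ofList (d.getD t1 [])
    let d2 := PySem.Dict.ofList (d.getD t2 [])
    d1.keys.foldl (fun res doc =>
      if d2.contains doc then
        let positions1 := d1.getD doc []
        let positions2 := d2.getD doc []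
        -- for pos1 …: for pos2 …: if |pos1-pos2| ≤ k: add; break  (inner loop with break = List.any)
        positions1.foldl (fun res pos1 =>
          if positions2.any (fun pos2 => decide (|pos1 - pos2| ≤ k)) then PySem.Set.add res doc else res) res
      else res) result
  else result

-- ===== PORT B =====
-- the while-loop with two indices i, j of Source B, as recursion on the two (sorted) lists
def twoPtr (xs ys : List Int) (k : Int) : Bool :=
  match xs, ys with
  | x :: xs', y :: ys' =>
    if |x - y| ≤ k then true
    else if x < y then twoPtr xs' (y :: ys') k
    else twoPtr (x :: xs') ys' k
  | _, _ => false
termination_by xs.length + ys.length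

def near_query_alt (positional_index : List (String × List (Int × List Int))) (token1 : String) (token2 : String) (k : Int) : List Int :=
  let d := PySem.Dict.ofList positional_index
  match d.get? (PySem.Str.lower token1), d.get? (PySem.Str.lower token2) with
  | some l1, some l2 =>
    let d1 := PySem.Dict.ofList l1
    let d2 := PySem.Dict.ofList l2
    d1.items.foldl (fun res it =>
      match d2.get? it.1 with
      | some positions2 =>
        if twoPtr (PySem.List.sorted it.2 (fun x => x) false) (PySem.List.sorted positions2 (fun x => x) false) k
        then PySem.Set.add res it.1 else res
      | none => res) PySem.Set.empty
  | _, _ => PySem.Set.empty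

-- ===== PRECONDITION & SPEC =====
def Spec_near_query (positional_index : List (String × List (Int × List Int))) (token1 : String) (token2 : String) (k : Int) (out : List Int) : Prop := out = near_query_alt positional_index token1 token2 k
instance (positional_index : List (String × List (Int × List Int))) (token1 : String) (token2 : String) (k : Int) (out : List Int) : Decidable (Spec_near_query positional_index token1 token2 k out) := by unfold Spec_near_query; infer_instance

-- ===== CLAIM (what is proved, stated in full; the proofs are below) =====
def Claim_equal_near_query : Prop := ∀ (positional_index : List (String × List (Int × List Int))) (token1 : String) (token2 : String) (k : Int), Dom_near_query positional_index token1 token2 k → Spec_near_query positional_index token1 token2 k (near_query positional_index token1 token2 k)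

-- ===== LEMMAS AND PROOFS =====

-- adding the same element twice is adding it once
theorem set_add_add (s : PySem.Set Int) (x : Int) :
    PySem.Set.add (PySem.Set.add s x) x = PySem.Set.add s x := by
  apply PySem.Set.add_of_mem
  simp [PySem.Set.mem_add]

-- A's conditional-add loop over positions1 collapses to a single conditional add
theorem foldl_cond_add (c : Int → Bool) (l : List Int) (res : PySem.Set Int) (d : Int) :
    l.foldl (fun res p => if c p then PySem.Set.add res d else res) res
      = if l.any c then PySem.Set.add res d else res := by
  induction l generalizing res with
  | nil => simp
  | cons x xs ih =>
    by_cases h : c x = true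
    · simp only [List.foldl_cons, List.any_cons, h, if_true, Bool.true_or, ih]
      split_ifs <;> simp only [set_add_add]
    · simp only [List.foldl_cons, List.any_cons, h, Bool.false_or, ih, Bool.not_eq_true] at *
      simp

-- any respects pointwise-equal predicates
theorem any_ext (l : List Int) (p q : Int → Bool) (h : ∀ x ∈ l, p x = q x) :
    l.any p = l.any q := by
  induction l with
  | nil => rfl
  | cons x xs ih =>
    simp only [List.any_cons, h x (by simp), ih (fun a ha => h a (by simp [ha]))]

-- any respects permutations
theorem any_perm {xs ys : List Int} (h : xs.Perm ys) (p : Int → Bool) :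
    xs.any p = ys.any p := by
  cases hx : xs.any p <;> cases hy : ys.any p <;> try rfl
  · obtain ⟨a, ha, hpa⟩ := List.any_eq_true.mp hy
    have hc := List.any_eq_true.mpr ⟨a, h.mem_iff.mpr ha, hpa⟩
    rw [hx] at hc; simp at hc
  · obtain ⟨a, ha, hpa⟩ := List.any_eq_true.mp hx
    have hc := List.any_eq_true.mpr ⟨a, h.mem_iff.mp ha, hpa⟩
    rw [hy] at hc; simp at hc

-- two-pointer correctness on sorted lists: it decides existence of a pair within k
theorem twoPtr_eq_any (xs ys : List Int) (k : Int)
    (hx : xs.Pairwise (· ≤ ·)) (hy : ys.Pairwise (· ≤ ·)) :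
    twoPtr xs ys k = xs.any (fun x => ys.any (fun y => decide (|x - y| ≤ k))) := by
  fun_induction twoPtr xs ys k with
  | case1 x xs' y ys' hle =>
    symm
    apply List.any_eq_true.mpr
    exact ⟨x, by simp, List.any_eq_true.mpr ⟨y, by simp, by simpa using hle⟩⟩
  | case2 x xs' y ys' hnot hlt ih =>
    -- x < y and |x - y| > k: x pairs with nothing in y :: ys'
    have hxnone : ((y :: ys').any fun y' => decide (|x - y'| ≤ k)) = false := by
      apply List.any_eq_false.mpr
      intro y' hy'
      have hyy' : y ≤ y' := by
        rcases List.mem_cons.mp hy' with h | h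
        · omega
        · exact (List.pairwise_cons.mp hy).1 y' h
      have ha1 := abs_of_nonpos (show x - y ≤ 0 by omega)
      have ha2 := abs_of_nonpos (show x - y' ≤ 0 by omega)
      simp only [decide_eq_true_eq]
      omega
    rw [ih hx.tail hy, List.any_cons, hxnone, Bool.false_or]
  | case3 x xs' y ys' hnot hge ih =>
    -- y ≤ x and |x - y| > k: y pairs with nothing in x :: xs'
    rw [ih hx hy.tail]
    apply any_ext
    intro x' hx'
    have hxx' : x ≤ x' := by
      rcases List.mem_cons.mp hx' with h | h
      · omega
      · exact (List.pairwise_cons.mp hx).1 x' h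
    have ha1 := abs_of_nonneg (show (0:Int) ≤ x - y by omega)
    have ha2 := abs_of_nonneg (show (0:Int) ≤ x' - y by omega)
    have hdy : decide (|x' - y| ≤ k) = false := by
      simp only [decide_eq_false_iff_not]
      omega
    rw [List.any_cons, hdy, Bool.false_or]
  | case4 =>
    rename_i xs0 ys0 hcontra
    cases xs0 with
    | nil => rfl
    | cons a as =>
      cases ys0 with
      | nil => simp
      | cons b bs => exact (hcontra a as b bs rfl rfl).elim

theorem twoPtr_sorted_eq (ps1 ps2 : List Int) (k : Int) :
    twoPtr (PySem.List.sorted ps1 (fun x => x) false) (PySem.List.sorted ps2 (fun x => x) false) k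
      = ps1.any (fun p1 => ps2.any (fun p2 => decide (|p1 - p2| ≤ k))) := by
  rw [twoPtr_eq_any _ _ k (by simpa using PySem.List.sorted_pairwise ps1 (fun x => x))
        (by simpa using PySem.List.sorted_pairwise ps2 (fun x => x))]
  rw [any_perm (PySem.List.sorted_perm ps1 (fun x => x) false)]
  apply any_ext
  intro p1 _
  exact any_perm (PySem.List.sorted_perm ps2 (fun x => x) false) _

-- ===== VERDICT (by name: the statement is the Claim_ definition above) =====
theorem near_query_spec : Claim_equal_near_query := by
  intro pi token1 token2 k _
  unfold Spec_near_query near_query near_query_alt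
  simp only
  rcases h1 : (PySem.Dict.ofList pi).get? (PySem.Str.lower token1) with _ | l1 <;>
    rcases h2 : (PySem.Dict.ofList pi).get? (PySem.Str.lower token2) with _ | l2 <;>
    simp only [PySem.Dict.contains_eq_isSome_get?, h1, h2, Option.isSome_none, Option.isSome_some,
      Bool.false_and, Bool.and_false, Bool.and_self, Bool.false_eq_true, if_false,
      if_true]
  -- both tokens present
  have e1 : (PySem.Dict.ofList pi).getD (PySem.Str.lower token1) [] = l1 :=
    PySem.Dict.getD_of_get?_eq_some _ [] h1
  have e2 : (PySem.Dict.ofList pi).getD (PySem.Str.lower token2) [] = l2 :=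
    PySem.Dict.getD_of_get?_eq_some _ [] h2
  rw [e1, e2]
  have hkeys : (PySem.Dict.ofList l1).keys = (PySem.Dict.ofList l1).items.map (·.1) := rfl
  rw [hkeys, List.foldl_map]
  apply PySem.List.foldl_congr_mem
  intro res it hit
  rcases hg : (PySem.Dict.ofList l2).get? it.1 with _ | ps2 <;>
    simp only [Option.isSome_none, Option.isSome_some, Bool.false_eq_true, if_false, if_true]
  have hit' : (it.1, it.2) ∈ (PySem.Dict.ofList l1).items := by simpa using hit
  have hv1 : (PySem.Dict.ofList l1).getD it.1 [] = it.2 :=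
    PySem.Dict.getD_of_mem_items _ hit' (PySem.Dict.nodup_keys_ofList l1) []
  have hv2 : (PySem.Dict.ofList l2).getD it.1 [] = ps2 :=
    PySem.Dict.getD_of_get?_eq_some _ [] hg
  rw [hv1, hv2, foldl_cond_add, twoPtr_sorted_eq]
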